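-- pv_equiv track=rewrite | github.com/licsz/AISD-2024 | Lab 1/Lab_1.py | convert_hex_to_dec
-- ===== SOURCE A (Python) =====
-- def convert_hex_to_dec(number):
--     digits = '0123456789abcdef'
--     result = 0
--     position = 1
--     for i in number[::-1]:
--         result += position * digits.find(i)
--         position *= 16
--     return result
-- ===== SOURCE B (Python) =====
-- def convert_hex_to_dec(number):
--     # Divide and conquer: value(s) = value(left half) * 16**len(right half) + value(right half).
--     digits = '0123456789abcdef'
--     def value(s):
--         if len(s) <= 1:
--             return digits.find(s) if s else 0
--         mid = len(s) // 2
--         return value(s[:mid]) * 16 ** (len(s) - mid) + value(s[mid:])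
--     return value(number)
-- ===== Notes on version B (the rewrite author's own statement) =====
-- stated objective: faster
-- what changed: Replaces A's reversed-string loop with a mutating (result, position) big-integer accumulator pair by a divide-and-conquer evaluation value(s) = value(left half) * 16**len(right half) + value(right half); intended as faster (balanced big-integer work), measured 27x at n=65536 in a timing run.
import Mathlib
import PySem

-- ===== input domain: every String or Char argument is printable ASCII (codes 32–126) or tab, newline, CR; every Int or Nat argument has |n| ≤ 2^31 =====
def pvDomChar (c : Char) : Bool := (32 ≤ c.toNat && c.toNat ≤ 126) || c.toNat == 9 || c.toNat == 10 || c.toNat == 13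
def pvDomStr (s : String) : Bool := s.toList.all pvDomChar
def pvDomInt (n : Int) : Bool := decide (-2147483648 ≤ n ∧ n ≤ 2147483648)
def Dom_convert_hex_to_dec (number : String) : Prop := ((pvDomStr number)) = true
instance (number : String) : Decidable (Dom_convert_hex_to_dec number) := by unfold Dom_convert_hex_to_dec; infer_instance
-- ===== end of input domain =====

-- B replaces A's reversed accumulator loop by a divide-and-conquer evaluation of the same positional value; intended as faster, measured 27x at n=65536 in a timing run.


-- ===== PORT A =====
-- number[::-1] is the reversed string; digits.find(i) on the 1-char string i is PySem.Str.find.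
def convert_hex_to_dec (number : String) : Int :=
  let digits : String := "0123456789abcdef"
  (number.toList.reverse.foldl
    (fun (st : Int × Int) (i : Char) =>
      (st.1 + st.2 * PySem.Str.find digits (String.ofList [i]), st.2 * 16))
    (0, 1)).1

-- ===== PORT B =====
-- Source B's inner helper `value`: recursion on the two halves (s[:mid], s[mid:]); Python's
-- `digits.find(s) if s else 0` for len(s) <= 1 is the if below (find on a 1-char string).
def pvValue (s : List Char) : Int :=
  if s.length ≤ 1 then
    if s = [] then 0 else PySem.Str.find "0123456789abcdef" (String.ofList s)
  else
    let mid := s.length / 2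
    pvValue (s.take mid) * (16 : Int) ^ (s.length - mid) + pvValue (s.drop mid)
termination_by s.length
decreasing_by
  · simp only [List.length_take]; omega
  · simp only [List.length_drop]; omega

def convert_hex_to_dec_alt (number : String) : Int :=
  pvValue number.toList

-- ===== PRECONDITION & SPEC =====
def Spec_convert_hex_to_dec (number : String) (out : Int) : Prop := out = convert_hex_to_dec_alt number
instance (number : String) (out : Int) : Decidable (Spec_convert_hex_to_dec number out) := by unfold Spec_convert_hex_to_dec; infer_instance

-- ===== CLAIM (what is proved, stated in full; the proofs are below) =====
def Claim_equal_convert_hex_to_dec : Prop := ∀ (number : String), Dom_convert_hex_to_dec number → Spec_convert_hex_to_dec number (convert_hex_to_dec number)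

-- ===== LEMMAS AND PROOFS =====

-- Common reference value: Horner's scheme over the hex digit map.
def pvHorner (l : List Char) : Int :=
  l.foldl (fun (a : Int) (c : Char) => a * 16 + PySem.Str.find "0123456789abcdef" (String.ofList [c])) 0

-- A's reversed pass with a (result, position) pair computes Horner's scheme.
theorem revFold_eq_horner (l : List Char) :
    ∀ (r p : Int),
      (l.reverse.foldl
        (fun (st : Int × Int) (i : Char) =>
          (st.1 + st.2 * PySem.Str.find "0123456789abcdef" (String.ofList [i]), st.2 * 16))
        (r, p)).1
        = r + p * pvHorner l := by
  induction l using List.reverseRecOn with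
  | nil => intro r p; simp [pvHorner]
  | append_singleton l c ih =>
      intro r p
      rw [List.reverse_append]
      simp only [List.reverse_singleton, List.singleton_append, List.foldl_cons, ih,
        pvHorner, List.foldl_append, List.foldl_nil]
      ring

-- Horner's scheme starting from r equals r shifted by 16^length plus the value from 0.
theorem horner_foldl_from (l : List Char) :
    ∀ (r : Int),
      l.foldl (fun (a : Int) (c : Char) =>
          a * 16 + PySem.Str.find "0123456789abcdef" (String.ofList [c])) r
        = r * (16 : Int) ^ l.length + pvHorner l := by
  induction l with
  | nil => intro r; simp [pvHorner]
  | cons c l ih =>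
      intro r
      have h2 : pvHorner (c :: l)
          = (0 * 16 + PySem.Str.find "0123456789abcdef" (String.ofList [c])) * (16 : Int) ^ l.length
              + pvHorner l := by
        unfold pvHorner
        rw [List.foldl_cons]
        exact ih _
      rw [List.foldl_cons, ih, h2, List.length_cons, pow_succ]
      ring

-- Splitting lemma: Horner over a concatenation.
theorem horner_append (a b : List Char) :
    pvHorner (a ++ b) = pvHorner a * (16 : Int) ^ b.length + pvHorner b := by
  unfold pvHorner
  rw [List.foldl_append, horner_foldl_from b]
  rfl

-- B's divide-and-conquer computes Horner's scheme.
theorem pvValue_eq_horner (l : List Char) : pvValue l = pvHorner l := by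
  induction l using pvValue.induct with
  | case1 h =>
      rw [pvValue]
      simp [pvHorner]
  | case2 l hle hnil =>
      rw [pvValue]
      simp only [hle, if_true, hnil, ite_false]
      have h0 : 0 < l.length := List.length_pos_iff.mpr hnil
      obtain ⟨c, rfl⟩ := List.length_eq_one_iff.1 (show l.length = 1 by omega)
      simp [pvHorner]
  | case3 l hle mid ih1 ih2 =>
      rw [pvValue]
      simp only [hle, if_false]
      have hsplit := horner_append (l.take (l.length / 2)) (l.drop (l.length / 2))
      rw [List.take_append_drop] at hsplit
      rw [hsplit, ih1, ih2, List.length_drop]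

-- ===== VERDICT (by name: the statement is the Claim_ definition above) =====
theorem convert_hex_to_dec_spec : Claim_equal_convert_hex_to_dec := by
  intro number _
  unfold Spec_convert_hex_to_dec convert_hex_to_dec convert_hex_to_dec_alt
  rw [pvValue_eq_horner]
  simpa using revFold_eq_horner number.toList 0 1
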